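-- pv_equiv track=rewrite | github.com/debdattasarkar/DSA | 2. GFG/6. Top 50 Tree Problems/1. (M) Maximum GCD of siblings of a binary tree/py_sol.py | maxBinTreeGCD
-- ===== SOURCE A (Python) =====
-- from math import gcd
-- from collections import defaultdict
--
-- def maxBinTreeGCD(arr, N):
--     """
--     Time  : O(E) ~ O(N) because we touch each edge once and at most compute a few gcds.
--     Space : O(E) to store parent->children lists.
--     """
--     if not arr:
--         return 0
--
--     # 1) Build parent -> list of children
--     children = defaultdict(list)
--     for p, c in arr:
--         children[p].append(c)
--
--     # 2) For each parent, if >= 2 children, compute best sibling gcd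
--     ans = 0
--     for p, kids in children.items():
--         if len(kids) >= 2:
--             # Normally, binary tree => len(kids) <= 2
--             # Be robust if more appear: compute the best pairwise gcd.
--             if len(kids) == 2:
--                 ans = max(ans, gcd(kids[0], kids[1]))
--             else:
--                 # Robustness: best pairwise gcd among the children (rare if input breaks binary property)
--                 # O(k^2) where k is tiny in practice.
--                 k = len(kids)
--                 for i in range(k):
--                     for j in range(i + 1, k):
--                         ans = max(ans, gcd(kids[i], kids[j]))
--     return ans
-- ===== SOURCE B (Python) =====
-- from math import gcd
--
-- def maxBinTreeGCD(arr, N):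
--     # Single fused pass: for each edge (p, c), gcd c against the children of p
--     # seen so far, updating a running max; no second pass over a built dict.
--     seen = {}
--     ans = 0
--     for p, c in arr:
--         prior = seen.get(p)
--         if prior is None:
--             seen[p] = [c]
--         else:
--             for x in prior:
--                 g = gcd(x, c)
--                 if g > ans:
--                     ans = g
--             prior.append(c)
--     return ans
-- ===== Notes on version B (the rewrite author's own statement) =====
-- stated objective: simpler
-- what changed: B replaces A's two-phase algorithm (build a parent->children dict, then a second pass over its items with a len==2 special case and nested index loops) by a single fused pass over the edges that gcds each child against the previously seen children of its parent into a running max.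
import Mathlib
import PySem

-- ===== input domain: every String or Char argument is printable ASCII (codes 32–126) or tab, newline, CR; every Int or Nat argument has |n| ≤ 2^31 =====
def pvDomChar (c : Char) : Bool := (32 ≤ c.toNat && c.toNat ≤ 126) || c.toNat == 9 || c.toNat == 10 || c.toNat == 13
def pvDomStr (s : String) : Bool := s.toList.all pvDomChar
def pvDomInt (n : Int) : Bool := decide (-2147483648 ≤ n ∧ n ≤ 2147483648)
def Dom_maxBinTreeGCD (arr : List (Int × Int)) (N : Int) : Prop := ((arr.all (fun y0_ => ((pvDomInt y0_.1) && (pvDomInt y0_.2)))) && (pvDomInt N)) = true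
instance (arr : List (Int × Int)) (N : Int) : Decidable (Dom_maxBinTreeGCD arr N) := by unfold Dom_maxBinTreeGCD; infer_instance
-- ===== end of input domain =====

-- B fuses A's two passes (build parent->children dict, then per-parent pairwise gcd scan)
-- into one traversal that gcds each child against the earlier children of its parent (simpler).

-- ===== PORT A =====
def maxBinTreeGCD (arr : List (Int × Int)) (N : Int) : Int :=
  if arr = [] then 0
  else
    let children : PySem.Dict Int (List Int) :=
      arr.foldl (fun d pc => d.modify pc.1 [] (· ++ [pc.2])) PySem.Dict.empty
    children.items.foldl (fun ans kv =>
      let kids := kv.2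
      if kids.length ≥ 2 then
        if kids.length == 2 then
          max ans ((Int.gcd (kids.getD 0 0) (kids.getD 1 0) : Int))
        else
          (PySem.List.pyRange 0 kids.length 1).foldl (fun a i =>
            (PySem.List.pyRange (i + 1) kids.length 1).foldl (fun a j =>
              max a ((Int.gcd (PySem.List.pyGetD kids i 0) (PySem.List.pyGetD kids j 0) : Int))) a) ans
      else ans) 0

-- ===== PORT B =====
-- one step of B's single pass: gcd pc.2 against the children of pc.1 seen so far
-- into the running max, then record pc.2
def altStep (st : PySem.Dict Int (List Int) × Int) (pc : Int × Int) :
    PySem.Dict Int (List Int) × Int :=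
  match st.1.get? pc.1 with
  | none => (st.1.insert pc.1 [pc.2], st.2)
  | some prior =>
      (st.1.insert pc.1 (prior ++ [pc.2]),
       prior.foldl (fun a x =>
         if ((Int.gcd x pc.2 : Int)) > a then ((Int.gcd x pc.2 : Int)) else a) st.2)

def maxBinTreeGCD_alt (arr : List (Int × Int)) (N : Int) : Int :=
  (arr.foldl altStep (PySem.Dict.empty, 0)).2

-- ===== PRECONDITION & SPEC =====
def Spec_maxBinTreeGCD (arr : List (Int × Int)) (N : Int) (out : Int) : Prop := out = maxBinTreeGCD_alt arr N
instance (arr : List (Int × Int)) (N : Int) (out : Int) : Decidable (Spec_maxBinTreeGCD arr N out) := by unfold Spec_maxBinTreeGCD; infer_instance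

-- ===== CLAIM (what is proved, stated in full; the proofs are below) =====
def Claim_equal_maxBinTreeGCD : Prop := ∀ (arr : List (Int × Int)) (N : Int), Dom_maxBinTreeGCD arr N → Spec_maxBinTreeGCD arr N (maxBinTreeGCD arr N)

-- ===== LEMMAS AND PROOFS =====

-- best pairwise gcd among xs, threaded through a running max a (the order both programs use)
def pairUp : List Int → Int → Int
  | [], a => a
  | x :: xs, a => pairUp xs (xs.foldl (fun a y => max a ((Int.gcd x y : Int))) a)

-- pulling a max out of a running-max fold
lemma foldl_max_pull {α : Type} (f : α → Int) (xs : List α) (a : Int) :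
    ∀ b : Int, xs.foldl (fun acc y => max acc (f y)) (max a b) =
      max a (xs.foldl (fun acc y => max acc (f y)) b) := by
  induction xs with
  | nil => intro b; rfl
  | cons x xs ih =>
      intro b
      simp only [List.foldl_cons, max_assoc]
      exact ih (max b (f x))

lemma pairUp_pull (xs : List Int) (a : Int) :
    ∀ b : Int, pairUp xs (max a b) = max a (pairUp xs b) := by
  induction xs with
  | nil => intro b; rfl
  | cons x xs ih =>
      intro b
      simp only [pairUp, foldl_max_pull]
      exact ih _

lemma le_pairUp (xs : List Int) (a : Int) : a ≤ pairUp xs a := by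
  induction xs generalizing a with
  | nil => exact le_refl a
  | cons x xs ih =>
      calc a ≤ xs.foldl (fun acc y => max acc ((Int.gcd x y : Int))) a :=
              (PySem.List.le_foldl_max_int xs _ a).1
        _ ≤ _ := ih _

lemma pairUp_append (xs : List Int) (c : Int) :
    ∀ a : Int, pairUp (xs ++ [c]) a =
      xs.foldl (fun acc x => max acc ((Int.gcd x c : Int))) (pairUp xs a) := by
  induction xs with
  | nil => intro a; rfl
  | cons x xs ih =>
      intro a
      simp only [List.cons_append, pairUp, List.foldl_append, List.foldl_cons, List.foldl_nil]
      rw [ih]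
      congr 1
      rw [max_comm (xs.foldl _ a) ((Int.gcd x c : Int)), pairUp_pull, max_comm]

-- the nested range(i) / range(i+1, k) loops of A compute pairUp
lemma range_drop_pairUp (kids : List Int) :
    ∀ ans : Int,
      (List.range kids.length).foldl (fun a k =>
        (kids.drop (k + 1)).foldl (fun a y => max a ((Int.gcd (kids.getD k 0) y : Int))) a) ans
      = pairUp kids ans := by
  induction kids with
  | nil => intro ans; rfl
  | cons x xs ih =>
      intro ans
      rw [List.length_cons, List.range_succ_eq_map]
      simp only [List.foldl_cons, List.foldl_map, List.drop_succ_cons, List.getD_cons_succ,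
        List.getD_cons_zero, List.drop_zero, pairUp]
      exact ih _

lemma dloop_eq (kids : List Int) (ans : Int) :
    (PySem.List.pyRange 0 (kids.length : Int) 1).foldl (fun a i =>
      (PySem.List.pyRange (i + 1) (kids.length : Int) 1).foldl (fun a j =>
        max a ((Int.gcd (PySem.List.pyGetD kids i 0) (PySem.List.pyGetD kids j 0) : Int))) a) ans
    = pairUp kids ans := by
  have h1 : ∀ (a : Int) (i : Int), i ∈ PySem.List.pyRange 0 (kids.length : Int) 1 →
      (PySem.List.pyRange (i + 1) (kids.length : Int) 1).foldl (fun a j =>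
        max a ((Int.gcd (PySem.List.pyGetD kids i 0) (PySem.List.pyGetD kids j 0) : Int))) a
      = (kids.drop (i + 1).toNat).foldl (fun a y =>
          max a ((Int.gcd (PySem.List.pyGetD kids i 0) y : Int))) a := by
    intro a i hi
    have h0 : (0:Int) ≤ i := ((PySem.List.mem_pyRange_one).1 hi).1
    exact PySem.List.foldl_pyRange_pyGetD' kids 0
      (fun a y => max a ((Int.gcd (PySem.List.pyGetD kids i 0) y : Int))) a (by omega)
  rw [PySem.List.foldl_congr_mem _ _ _ _ h1]
  rw [PySem.List.pyRange_zero_natCast, List.foldl_map]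
  have h2 : ∀ (a : Int) (k : Nat), k ∈ List.range kids.length →
      (kids.drop ((k : Int) + 1).toNat).foldl (fun a y =>
          max a ((Int.gcd (PySem.List.pyGetD kids (k : Int) 0) y : Int))) a
      = (kids.drop (k + 1)).foldl (fun a y => max a ((Int.gcd (kids.getD k 0) y : Int))) a := by
    intro a k _
    have : ((k : Int) + 1).toNat = k + 1 := by omega
    rw [this, PySem.List.pyGetD_natCast]
  rw [PySem.List.foldl_congr_mem _ _ _ _ h2]
  exact range_drop_pairUp kids ans

-- A's per-item branch equals 'max ans (pairUp kids 0)' for a nonnegative running max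
lemma Astep_eq (ans : Int) (h : 0 ≤ ans) (kv : Int × List Int) :
    (if kv.2.length ≥ 2 then
        if kv.2.length == 2 then
          max ans ((Int.gcd (kv.2.getD 0 0) (kv.2.getD 1 0) : Int))
        else
          (PySem.List.pyRange 0 (kv.2.length : Int) 1).foldl (fun a i =>
            (PySem.List.pyRange (i + 1) (kv.2.length : Int) 1).foldl (fun a j =>
              max a ((Int.gcd (PySem.List.pyGetD kv.2 i 0) (PySem.List.pyGetD kv.2 j 0) : Int))) a) ans
      else ans)
    = max ans (pairUp kv.2 0) := by
  obtain ⟨p, kids⟩ := kv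
  by_cases h2 : kids.length ≥ 2
  · by_cases he : kids.length = 2
    · obtain ⟨x, y, rfl⟩ := List.length_eq_two.1 he
      simp only [he]
      norm_num [pairUp]
    · have : (kids.length == 2) = false := by simpa using he
      simp only [if_pos h2, this, Bool.false_eq_true, if_false]
      rw [dloop_eq]
      rw [show ans = max ans 0 by omega, pairUp_pull]
      omega
  · simp only [if_neg h2]
    interval_cases hl : kids.length
    · obtain rfl := List.length_eq_zero_iff.1 hl
      simp [pairUp]; omega
    · obtain ⟨x, rfl⟩ := List.length_eq_one_iff.1 hl
      simp [pairUp]; omega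

lemma Afold_eq (its : List (Int × List Int)) :
    ∀ ans : Int, 0 ≤ ans →
      its.foldl (fun ans kv =>
        if kv.2.length ≥ 2 then
          if kv.2.length == 2 then
            max ans ((Int.gcd (kv.2.getD 0 0) (kv.2.getD 1 0) : Int))
          else
            (PySem.List.pyRange 0 (kv.2.length : Int) 1).foldl (fun a i =>
              (PySem.List.pyRange (i + 1) (kv.2.length : Int) 1).foldl (fun a j =>
                max a ((Int.gcd (PySem.List.pyGetD kv.2 i 0) (PySem.List.pyGetD kv.2 j 0) : Int))) a) ans
        else ans) ans
      = its.foldl (fun acc kv => max acc (pairUp kv.2 0)) ans := by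
  induction its with
  | nil => intro ans _; rfl
  | cons kv its ih =>
      intro ans h
      simp only [List.foldl_cons]
      rw [Astep_eq ans h kv]
      exact ih _ (by have := le_pairUp kv.2 0; omega)

-- B's dict component is exactly A's children dict
lemma altStep_fst (st : PySem.Dict Int (List Int) × Int) (pc : Int × Int) :
    (altStep st pc).1 = st.1.modify pc.1 [] (· ++ [pc.2]) := by
  unfold altStep
  cases hg : st.1.get? pc.1 with
  | none =>
      simp only []
      rw [show st.1.modify pc.1 [] (· ++ [pc.2]) = st.1.insert pc.1 ((st.1.getD pc.1 []) ++ [pc.2]) from rfl]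
      rw [PySem.Dict.getD_of_get?_eq_none st.1 [] hg]
      simp
  | some prior =>
      simp only []
      rw [show st.1.modify pc.1 [] (· ++ [pc.2]) = st.1.insert pc.1 ((st.1.getD pc.1 []) ++ [pc.2]) from rfl]
      rw [PySem.Dict.getD_of_get?_eq_some st.1 [] hg]

lemma Bfold_fst (arr : List (Int × Int)) :
    ∀ st : PySem.Dict Int (List Int) × Int,
      (arr.foldl altStep st).1 =
        arr.foldl (fun d pc => d.modify pc.1 [] (· ++ [pc.2])) st.1 := by
  induction arr with
  | nil => intro st; rfl
  | cons pc arr ih =>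
      intro st
      simp only [List.foldl_cons]
      rw [ih, altStep_fst]

-- B's running max equals the canonical fold over the children dict's items
lemma Binv (arr : List (Int × Int)) :
    (arr.foldl altStep (PySem.Dict.empty, 0)).2 =
      (arr.foldl (fun d pc => d.modify pc.1 [] (· ++ [pc.2])) PySem.Dict.empty).items.foldl
        (fun acc kv => max acc (pairUp kv.2 0)) 0 := by
  induction arr using List.reverseRecOn with
  | nil => rfl
  | append_singleton xs e ih =>
      rw [List.foldl_append, List.foldl_append]
      have hd : (xs.foldl altStep (PySem.Dict.empty, 0)).1 =
          xs.foldl (fun d pc => d.modify pc.1 [] (· ++ [pc.2])) PySem.Dict.empty :=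
        Bfold_fst xs (PySem.Dict.empty, 0)
      set D := xs.foldl (fun d pc => d.modify pc.1 [] (· ++ [pc.2])) PySem.Dict.empty with hD
      set st := xs.foldl altStep (PySem.Dict.empty, 0) with hst
      have hF0 : (0:Int) ≤ D.items.foldl (fun acc kv => max acc (pairUp kv.2 0)) 0 :=
        (PySem.List.le_foldl_max_int D.items _ 0).1
      have hmod : D.modify e.1 [] (· ++ [e.2]) = D.insert e.1 (D.getD e.1 [] ++ [e.2]) := rfl
      simp only [List.foldl_cons, List.foldl_nil]
      cases hg : D.get? e.1 with
      | none =>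
          have hstep : altStep st e = (st.1.insert e.1 [e.2], st.2) := by
            unfold altStep; rw [hd, hg]
          rw [hstep]
          have hcont : D.contains e.1 = false := by
            rw [PySem.Dict.contains_eq_isSome_get?, hg]; rfl
          rw [hmod, PySem.Dict.getD_of_get?_eq_none D [] hg,
            PySem.Dict.items_insert_of_not_contains D _ hcont]
          rw [List.foldl_append]
          simp only [List.foldl_cons, List.foldl_nil, List.nil_append, pairUp]
          rw [ih]
          omega
      | some K =>
          have hstep : altStep st e =
              (st.1.insert e.1 (K ++ [e.2]),
               K.foldl (fun a x =>
                 if ((Int.gcd x e.2 : Int)) > a then ((Int.gcd x e.2 : Int)) else a) st.2) := by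
            unfold altStep; rw [hd, hg]
          rw [hstep]
          -- the if-max step is a running max
          have hmax : K.foldl (fun a x =>
                if ((Int.gcd x e.2 : Int)) > a then ((Int.gcd x e.2 : Int)) else a) st.2
              = K.foldl (fun a x => max a ((Int.gcd x e.2 : Int))) st.2 :=
            PySem.List.foldl_congr_mem K _ _ st.2 (by
              intro acc x _
              split_ifs with h <;> omega)
          -- split D.items at the unique entry with key e.1
          obtain ⟨l1, l2, hsplit⟩ := List.append_of_mem (PySem.Dict.mem_items_of_get?_eq_some D hg)
          have hnd : D.keys.Nodup := by
            rw [hD]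
            exact PySem.Dict.nodup_keys_foldl_modify_key xs (fun pc => pc.1) []
              (fun _ pc v => v ++ [pc.2]) PySem.Dict.empty (by simp [PySem.Dict.keys_empty])
          have hnd' : (D.items.map (fun p => p.1)).Nodup := by
            simpa only [PySem.Dict.keys] using hnd
          rw [hsplit] at hnd'
          simp only [List.map_append, List.map_cons, List.nodup_append, List.nodup_cons,
            List.mem_cons, List.mem_map] at hnd'
          have hp1 : ∀ p ∈ l1, p.1 ≠ e.1 := by
            intro p hp
            exact hnd'.2.2 p.1 ⟨p, hp, rfl⟩ e.1 (Or.inl rfl)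
          have hp2 : ∀ p ∈ l2, p.1 ≠ e.1 := by
            intro p hp hpe
            exact hnd'.2.1.1 ⟨p, hp, hpe⟩
          have hcont : D.contains e.1 = true := by
            rw [PySem.Dict.contains_eq_isSome_get?, hg]; rfl
          have hitems : (D.insert e.1 (K ++ [e.2])).items = l1 ++ (e.1, K ++ [e.2]) :: l2 := by
            rw [PySem.Dict.items_insert_of_contains D _ hcont, hsplit]
            rw [List.map_append, List.map_cons]
            have m1 : List.map (fun p => if (p.1 == e.1) = true then (e.1, K ++ [e.2]) else p) l1 = l1 :=
              (List.map_congr_left (fun p hp => by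
                have hb : (p.1 == e.1) = false := by simpa using hp1 p hp
                simp [hb])).trans (List.map_id l1)
            have m2 : List.map (fun p => if (p.1 == e.1) = true then (e.1, K ++ [e.2]) else p) l2 = l2 :=
              (List.map_congr_left (fun p hp => by
                have hb : (p.1 == e.1) = false := by simpa using hp2 p hp
                simp [hb])).trans (List.map_id l2)
            rw [m1, m2]
            simp
          rw [hmod, PySem.Dict.getD_of_get?_eq_some D [] hg, hitems, hmax]
          rw [hsplit] at ih
          rw [List.foldl_append, List.foldl_cons] at ih ⊢
          dsimp only at ih ⊢
          have hPK : (0:Int) ≤ pairUp K 0 := le_pairUp K 0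
          have hst2 : (0:Int) ≤ st.2 := by
            rw [ih]
            have h1 := (PySem.List.le_foldl_max_int l2 (fun kv => pairUp kv.2 0)
              (max (List.foldl (fun acc kv => max acc (pairUp kv.2 0)) 0 l1) (pairUp K 0))).1
            omega
          have hG : pairUp (K ++ [e.2]) 0 =
              max (pairUp K 0) (K.foldl (fun acc x => max acc ((Int.gcd x e.2 : Int))) 0) := by
            rw [pairUp_append]
            rw [show pairUp K 0 = max (pairUp K 0) 0 by omega, foldl_max_pull]
            omega
          rw [hG]
          rw [show ∀ A P G2 : Int, max A (max P G2) = max G2 (max A P) from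
            fun A P G2 => by omega]
          rw [foldl_max_pull (fun kv => pairUp kv.2 0) l2]
          rw [← ih]
          rw [show st.2 = max st.2 0 by omega, foldl_max_pull]
          omega

-- ===== VERDICT (by name: the statement is the Claim_ definition above) =====
theorem maxBinTreeGCD_spec : Claim_equal_maxBinTreeGCD := by
  intro arr N _
  unfold Spec_maxBinTreeGCD maxBinTreeGCD maxBinTreeGCD_alt
  by_cases h : arr = []
  · subst h; rfl
  · rw [if_neg h]
    rw [Binv arr]
    exact Afold_eq _ 0 le_rfl
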